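-- pv_equiv track=rewrite | github.com/s243a/UnifyWeaver | examples/benchmark/benchmark_csharp_query_source_mode_sweep.py | _value_counts
-- ===== SOURCE A (Python) =====
-- def _value_counts(values: list[str]) -> str:
--     counts: dict[str, int] = {}
--     for value in values:
--         counts[value] = counts.get(value, 0) + 1
--     return ",".join(
--         f"{value}:{count}"
--         for value, count in sorted(counts.items(), key=lambda item: (-item[1], item[0]))
--     )
-- ===== SOURCE B (Python) =====
-- def _value_counts(values: list[str]) -> str:
--     counts: dict[str, int] = {}
--     for value in values:
--         counts[value] = counts.get(value, 0) + 1
--     buckets: dict[int, list[str]] = {}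
--     for value, count in counts.items():
--         buckets.setdefault(count, []).append(value)
--     parts: list[str] = []
--     for count in sorted(buckets, reverse=True):
--         for value in sorted(buckets[count]):
--             parts.append(f"{value}:{count}")
--     return ",".join(parts)
-- ===== Notes on version B (the rewrite author's own statement) =====
-- stated objective: alternative
-- what changed: A sorts all (value,count) items once by the composite key (-count, value); B instead builds a count->values bucket index, walks the distinct counts in descending order and sorts each bucket's values ascending, emitting bucket by bucket.
import Mathlib
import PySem

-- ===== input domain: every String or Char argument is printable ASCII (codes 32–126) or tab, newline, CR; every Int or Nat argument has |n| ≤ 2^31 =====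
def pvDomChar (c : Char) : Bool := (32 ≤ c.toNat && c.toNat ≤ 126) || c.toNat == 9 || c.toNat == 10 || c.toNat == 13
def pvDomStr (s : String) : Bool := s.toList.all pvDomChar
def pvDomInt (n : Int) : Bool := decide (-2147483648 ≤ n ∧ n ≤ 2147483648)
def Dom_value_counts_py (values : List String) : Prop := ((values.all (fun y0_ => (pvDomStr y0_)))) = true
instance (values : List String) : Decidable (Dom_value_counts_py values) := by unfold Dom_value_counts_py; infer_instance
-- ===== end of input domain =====

-- B replaces A's single composite-key (-count, value) sort of all items by a group-by-count
-- bucket index traversed in descending count order with each bucket sorted ascending (objective: alternative).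

-- ===== PORT A =====
def value_counts_py (values : List String) : String :=
  let counts : PySem.Dict String Int :=
    values.foldl (fun d v => d.insert v (d.getD v 0 + 1)) PySem.Dict.empty
  PySem.Str.join ","
    ((PySem.List.sorted2 counts.items (fun it => -it.2) (fun it => it.1)).map
      (fun it => it.1 ++ ":" ++ PySem.Int.toStr it.2))

-- ===== PORT B =====
def value_counts_py_alt (values : List String) : String :=
  let counts : PySem.Dict String Int :=
    values.foldl (fun d v => d.insert v (d.getD v 0 + 1)) PySem.Dict.empty
  let buckets : PySem.Dict Int (List String) :=
    counts.items.foldl (fun d p => d.modify p.2 [] (fun l => l ++ [p.1])) PySem.Dict.empty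
  let parts : List String :=
    (PySem.List.sorted buckets.keys (fun c => c) true).foldl
      (fun acc c =>
        (PySem.List.sorted (buckets.getD c []) (fun v => v)).foldl
          (fun acc2 v => acc2 ++ [v ++ ":" ++ PySem.Int.toStr c]) acc) []
  PySem.Str.join "," parts

-- ===== PRECONDITION & SPEC =====
def Spec_value_counts_py (values : List String) (out : String) : Prop := out = value_counts_py_alt values
instance (values : List String) (out : String) : Decidable (Spec_value_counts_py values out) := by unfold Spec_value_counts_py; infer_instance

-- ===== CLAIM (what is proved, stated in full; the proofs are below) =====
def Claim_equal_value_counts_py : Prop := ∀ (values : List String), Dom_value_counts_py values → Spec_value_counts_py values (value_counts_py values)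

-- ===== LEMMAS AND PROOFS =====

-- sorted with a tuple key is sorted with the corresponding lexicographic key
theorem sorted2_eq_sorted_lex {α : Type} (xs : List α) (k1 : α → Int) (k2 : α → String) :
    PySem.List.sorted2 xs k1 k2 = PySem.List.sorted xs (fun x => toLex (k1 x, k2 x)) := by
  have hbefore :
      (fun a b => decide (k1 a < k1 b) || !decide (k1 b < k1 a) && decide (k2 a < k2 b))
      = (fun a b => decide (toLex (k1 a, k2 a) < toLex (k1 b, k2 b))) := by
    funext a b
    rcases lt_trichotomy (k1 a) (k1 b) with h | h | h
    · simp [Prod.Lex.toLex_lt_toLex, h]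
    · simp [Prod.Lex.toLex_lt_toLex, h]
    · have h1 : ¬ (k1 a < k1 b) := not_lt_of_gt h
      have h2 : k1 a ≠ k1 b := ne_of_gt h
      simp [Prod.Lex.toLex_lt_toLex, h, h1, h2]
  show List.foldl (fun acc x => PySem.List.insertBy
      (fun a b => decide (k1 a < k1 b) || !decide (k1 b < k1 a) && decide (k2 a < k2 b)) x acc) [] xs
    = List.foldl (fun acc x => PySem.List.insertBy
      (fun a b => decide (toLex (k1 a, k2 a) < toLex (k1 b, k2 b))) x acc) [] xs
  rw [hbefore]

-- a fold appending one element at a time is append-of-map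
theorem foldl_append_singleton {α β : Type} (f : α → β) (l : List α) (acc : List β) :
    l.foldl (fun a x => a ++ [f x]) acc = acc ++ l.map f := by
  induction l generalizing acc with
  | nil => simp
  | cons x t ih => simp [ih]

-- buckets of xs: count ↦ values with that count (as built by B's second loop)
def bucketsOf (xs : List String) : PySem.Dict Int (List String) :=
  (PySem.Dict.counter xs).items.foldl (fun d p => d.modify p.2 [] (fun l => l ++ [p.1])) PySem.Dict.empty

theorem bucketsOf_getD (xs : List String) (c : Int) :
    (bucketsOf xs).getD c []
      = ((PySem.Dict.counter xs).items.filter (fun p => p.2 == c)).map (fun p => p.1) := by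
  unfold bucketsOf
  have h := PySem.Dict.getD_foldl_modify_append
    ((PySem.Dict.counter xs).items.map Prod.swap) (PySem.Dict.empty (κ := Int) (ν := List String)) c
  rw [List.foldl_map] at h
  simpa [Prod.swap, List.filter_map, Function.comp] using h

theorem bucketsOf_keys (xs : List String) :
    (bucketsOf xs).keys = PySem.Set.ofList ((PySem.Dict.counter xs).items.map (fun p => p.2)) := by
  unfold bucketsOf
  have h := PySem.Dict.keys_foldl_modify_key (PySem.Dict.counter xs).items (fun p => p.2)
    ([] : List String) (fun _ p _l => _l ++ [p.1]) PySem.Dict.empty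
  simpa [PySem.Set.update, PySem.Set.ofList, PySem.Dict.keys_empty] using h

theorem items_fst_nodup (xs : List String) :
    ((PySem.Dict.counter xs).items.map (fun p => p.1)).Nodup := by
  have h := PySem.Dict.nodup_keys_counter xs
  simpa [PySem.Dict.keys] using h

-- the grouped traversal of B, as a list of (value, count) pairs
def groupedOf (xs : List String) : List (String × Int) :=
  (PySem.List.sorted (bucketsOf xs).keys (fun c => c) true).flatMap
    (fun c => (PySem.List.sorted ((bucketsOf xs).getD c []) (fun v => v)).map (fun v => (v, c)))

theorem bucket_nodup (xs : List String) (c : Int) :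
    ((bucketsOf xs).getD c []).Nodup := by
  rw [bucketsOf_getD]
  have hs : (((PySem.Dict.counter xs).items.filter (fun p => p.2 == c)).map (fun p => p.1)).Sublist
      ((PySem.Dict.counter xs).items.map (fun p => p.1)) :=
    List.Sublist.map (fun p => p.1)
      (List.filter_sublist (p := fun p => p.2 == c) (l := (PySem.Dict.counter xs).items))
  exact hs.nodup (items_fst_nodup xs)

theorem mem_bucket (xs : List String) (c : Int) (v : String) :
    v ∈ (bucketsOf xs).getD c [] ↔ (v, c) ∈ (PySem.Dict.counter xs).items := by
  rw [bucketsOf_getD]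
  constructor
  · rintro h
    rcases List.mem_map.1 h with ⟨p, hp, rfl⟩
    rcases List.mem_filter.1 hp with ⟨hmem, hc⟩
    have hpc : p.2 = c := by simpa using hc
    rwa [show (p.1, c) = p by rw [← hpc]]
  · intro h
    exact List.mem_map.2 ⟨(v, c), List.mem_filter.2 ⟨h, by simp⟩, rfl⟩

theorem grouped_pairwise (xs : List String) :
    (groupedOf xs).Pairwise
      (fun a b => toLex (-a.2, a.1) < toLex (-b.2, b.1)) := by
  unfold groupedOf
  rw [List.flatMap_def, List.pairwise_flatten]
  constructor
  · intro l hl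
    rcases List.mem_map.1 hl with ⟨c, _, rfl⟩
    rw [List.pairwise_map]
    have hnd : (PySem.List.sorted ((bucketsOf xs).getD c []) (fun v => v)).Nodup :=
      (PySem.List.sorted_perm ((bucketsOf xs).getD c []) (fun v => v) false).symm.nodup (bucket_nodup xs c)
    have hle := PySem.List.sorted_pairwise ((bucketsOf xs).getD c []) (fun v => v)
    have hlt := hnd.and hle
    refine hlt.imp (fun {v1 v2} h => ?_)
    obtain ⟨hne, hle2⟩ := h
    exact Prod.Lex.toLex_lt_toLex.2 (Or.inr ⟨rfl, lt_of_le_of_ne hle2 hne⟩)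
  · rw [List.pairwise_map]
    have hnd : (PySem.List.sorted (bucketsOf xs).keys (fun c => c) true).Nodup :=
      (PySem.List.sorted_perm (bucketsOf xs).keys (fun c => c) true).symm.nodup (by
        rw [bucketsOf_keys]; exact PySem.Set.nodup_ofList _)
    have hge := PySem.List.sorted_pairwise_rev (bucketsOf xs).keys (fun c => c)
    have hlt := hnd.and hge
    refine hlt.imp (fun {c1 c2} h x hx y hy => ?_)
    obtain ⟨hne, hle⟩ := h
    rcases List.mem_map.1 hx with ⟨v1, _, rfl⟩
    rcases List.mem_map.1 hy with ⟨v2, _, rfl⟩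
    have h21 : c2 < c1 := lt_of_le_of_ne hle (fun h => hne h.symm)
    exact Prod.Lex.toLex_lt_toLex.2 (Or.inl (by omega))

theorem mem_grouped (xs : List String) (p : String × Int) :
    p ∈ groupedOf xs ↔ p ∈ (PySem.Dict.counter xs).items := by
  unfold groupedOf
  rw [List.mem_flatMap]
  constructor
  · rintro ⟨c, _, hp⟩
    rcases List.mem_map.1 hp with ⟨v, hv, rfl⟩
    rw [PySem.List.mem_sorted] at hv
    exact (mem_bucket xs c v).1 hv
  · intro hp
    refine ⟨p.2, ?_, ?_⟩
    · rw [PySem.List.mem_sorted, bucketsOf_keys, PySem.Set.mem_ofList]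
      exact List.mem_map_of_mem hp
    · exact List.mem_map.2 ⟨p.1,
        by rw [PySem.List.mem_sorted]; exact (mem_bucket xs p.2 p.1).2 (by simpa using hp),
        by simp⟩

theorem grouped_perm (xs : List String) :
    (groupedOf xs).Perm (PySem.Dict.counter xs).items := by
  have hnd1 : (groupedOf xs).Nodup :=
    (grouped_pairwise xs).imp (fun {a b} h hab => by subst hab; exact lt_irrefl _ h)
  have hnd2 : (PySem.Dict.counter xs).items.Nodup :=
    List.Nodup.of_map _ (items_fst_nodup xs)
  exact (List.perm_ext_iff_of_nodup hnd1 hnd2).2 (mem_grouped xs)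

theorem sorted2_items_eq (xs : List String) :
    PySem.List.sorted2 (PySem.Dict.counter xs).items (fun it => -it.2) (fun it => it.1)
      = groupedOf xs := by
  rw [sorted2_eq_sorted_lex]
  exact PySem.List.sorted_eq_of_perm_of_pairwise_lt _ _ _ (grouped_perm xs) (grouped_pairwise xs)

theorem main_eq (values : List String) :
    value_counts_py values = value_counts_py_alt values := by
  simp only [value_counts_py, value_counts_py_alt,
    PySem.Dict.foldl_insert_getD_add_one_eq_counter]
  congr 1
  rw [sorted2_items_eq]
  show (groupedOf values).map _ = _
  unfold groupedOf
  simp only [show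
      ((PySem.Dict.counter values).items.foldl
        (fun d p => d.modify p.2 [] (fun l => l ++ [p.1])) PySem.Dict.empty) = bucketsOf values
    from rfl]
  simp only [foldl_append_singleton, PySem.List.foldl_append_eq_flatMap]
  simp [List.map_flatMap, List.map_map, Function.comp_def]

-- ===== VERDICT (by name: the statement is the Claim_ definition above) =====
theorem value_counts_py_spec : Claim_equal_value_counts_py := by
  intro values _
  unfold Spec_value_counts_py
  exact main_eq values
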